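-- pv_equiv track=rewrite | github.com/kuderr/netsome | netsome/_converters/ipv6.py | _compress_address
-- ===== SOURCE A (Python) =====
-- def _compress_address(address: str) -> str:
--     """Apply IPv6 compression rules to address string."""
--     groups = address.split(":")
--
--     # Find the longest sequence of consecutive zero groups
--     max_zero_start = -1
--     max_zero_length = 0
--     current_zero_start = -1
--     current_zero_length = 0
--
--     for i, group in enumerate(groups):
--         if group == "0":
--             if current_zero_start == -1:
--                 current_zero_start = i
--                 current_zero_length = 1
--             else:
--                 current_zero_length += 1
--         else:
--             if current_zero_length > max_zero_length:
--                 max_zero_start = current_zero_start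
--                 max_zero_length = current_zero_length
--             current_zero_start = -1
--             current_zero_length = 0
--
--     # Check final sequence
--     if current_zero_length > max_zero_length:
--         max_zero_start = current_zero_start
--         max_zero_length = current_zero_length
--
--     # Apply compression if we found a sequence of 2 or more zeros
--     if max_zero_length >= 2:
--         left = groups[:max_zero_start]
--         right = groups[max_zero_start + max_zero_length :]
--
--         if not left and not right:
--             return "::"
--         elif not left:
--             return "::" + ":".join(right)
--         elif not right:
--             return ":".join(left) + "::"
--         else:
--             return ":".join(left) + "::" + ":".join(right)
--
--     return address
-- ===== SOURCE B (Python) =====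
-- def _compress_address(address: str) -> str:
--     """Apply IPv6 compression rules to address string."""
--     groups = address.split(":")
--     n = len(groups)
--     # Exhaustive window search: try every window length from longest down to 2,
--     # and within each length every start position left to right; the first
--     # all-zero window found is exactly the first longest zero run.
--     for k in range(n, 1, -1):
--         for i in range(n - k + 1):
--             if groups[i : i + k] == ["0"] * k:
--                 return ":".join(groups[:i]) + "::" + ":".join(groups[i + k :])
--     return address
-- ===== Notes on version B (the rewrite author's own statement) =====
-- stated objective: simpler
-- what changed: Replaces A's single-pass five-variable run-tracking state machine and four-way join cases by an exhaustive brute-force window search: try every window length from longest down to 2 and every start position, return on the first all-zero window found (which is provably the first longest zero run), rebuilt with one uniform join expression.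
import Mathlib
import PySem

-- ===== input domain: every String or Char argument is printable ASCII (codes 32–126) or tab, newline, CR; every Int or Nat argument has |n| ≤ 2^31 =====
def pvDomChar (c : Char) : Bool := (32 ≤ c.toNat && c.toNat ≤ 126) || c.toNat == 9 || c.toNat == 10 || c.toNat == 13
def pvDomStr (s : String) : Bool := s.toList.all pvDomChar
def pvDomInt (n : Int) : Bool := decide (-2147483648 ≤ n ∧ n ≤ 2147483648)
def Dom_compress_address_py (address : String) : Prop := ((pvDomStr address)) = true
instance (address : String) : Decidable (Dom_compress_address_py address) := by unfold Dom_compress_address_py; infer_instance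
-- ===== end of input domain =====

-- B replaces A's single-pass run-tracking state machine by an exhaustive window search
-- (longest window length first, then leftmost start), with one uniform rebuild expression
-- (objective: simpler structure; not faster).

-- ===== PORT A =====
-- state = (max_zero_start, max_zero_length, current_zero_start, current_zero_length)
def stepA (st : Int × Int × Int × Int) (p : Int × String) : Int × Int × Int × Int :=
  match st with
  | (ms, ml, cs, cl) =>
    if p.2 = "0" then
      if cs = -1 then (ms, ml, p.1, 1) else (ms, ml, cs, cl + 1)
    else
      if ml < cl then (cs, cl, -1, 0) else (ms, ml, -1, 0)

def compress_address_py (address : String) : String :=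
  let groups := (PySem.Str.split? address ":").getD []
  match (PySem.List.enumerate groups).foldl stepA (-1, 0, -1, 0) with
  | (ms, ml, cs, cl) =>
    let ms' := if ml < cl then cs else ms
    let ml' := if ml < cl then cl else ml
    if 2 ≤ ml' then
      let left := PySem.List.slice groups none (some ms')
      let right := PySem.List.slice groups (some (ms' + ml')) none
      if left = [] ∧ right = [] then "::"
      else if left = [] then "::" ++ PySem.Str.join ":" right
      else if right = [] then PySem.Str.join ":" left ++ "::"
      else PySem.Str.join ":" left ++ "::" ++ PySem.Str.join ":" right
    else address

-- ===== PORT B =====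
-- Source B: for k in range(n, 1, -1): for i in range(n - k + 1): if groups[i:i+k] == ["0"]*k: return …
-- (the early return inside the nested loops is the first hit of the nested findSome?)
def compress_address_py_alt (address : String) : String :=
  let groups := (PySem.Str.split? address ":").getD []
  let n : Int := (groups.length : Int)
  match (PySem.List.pyRange n 1 (-1)).findSome? (fun k =>
      (PySem.List.pyRange 0 (n - k + 1) 1).findSome? (fun i =>
        if PySem.List.slice groups (some i) (some (i + k)) = List.replicate k.toNat "0" then
          some (PySem.Str.join ":" (PySem.List.slice groups none (some i)) ++ "::" ++
                PySem.Str.join ":" (PySem.List.slice groups (some (i + k)) none))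
        else none)) with
  | some s => s
  | none => address

-- ===== PRECONDITION & SPEC =====
def Spec_compress_address_py (address : String) (out : String) : Prop := out = compress_address_py_alt address
instance (address : String) (out : String) : Decidable (Spec_compress_address_py address out) := by unfold Spec_compress_address_py; infer_instance

-- ===== CLAIM (what is proved, stated in full; the proofs are below) =====
def Claim_equal_compress_address_py : Prop := ∀ (address : String), Dom_compress_address_py address → Spec_compress_address_py address (compress_address_py address)

-- ===== LEMMAS AND PROOFS =====

-- the "first longest run" selection step
def pick (b r : Int × Int) : Int × Int := if b.2 < r.2 then r else b

-- A's post-loop final check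
def fin (st : Int × Int × Int × Int) : Int × Int :=
  match st with
  | (ms, ml, cs, cl) => if ml < cl then (cs, cl) else (ms, ml)

-- proof-side helper: the list of maximal zero runs of a group list, as (start, length)
def collectRuns : List String → Int → List (Int × Int)
  | [], _ => []
  | g :: t, i =>
    if g = "0" then
      let z := t.takeWhile (· == "0")
      (i, 1 + (z.length : Int)) :: collectRuns (t.drop z.length) (i + (1 + (z.length : Int)))
    else collectRuns t (i + 1)
termination_by gs _ => gs.length
decreasing_by
  · simp only [List.length_drop, List.length_cons]; omega
  · simp only [List.length_cons]; omega

lemma collectRuns_nil (i : Int) : collectRuns [] i = [] := by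
  rw [collectRuns]

lemma collectRuns_zero (t : List String) (i : Int) :
    collectRuns ("0" :: t) i =
      (i, 1 + ((t.takeWhile (· == "0")).length : Int)) ::
        collectRuns (t.drop (t.takeWhile (· == "0")).length)
          (i + (1 + ((t.takeWhile (· == "0")).length : Int))) := by
  rw [collectRuns]
  simp

lemma collectRuns_other (g : String) (t : List String) (i : Int) (h : g ≠ "0") :
    collectRuns (g :: t) i = collectRuns t (i + 1) := by
  rw [collectRuns]
  simp [h]

lemma fin_init (ms ml : Int) (h : 0 ≤ ml) : fin (ms, ml, -1, 0) = (ms, ml) := by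
  simp only [fin]
  rw [if_neg (by omega)]

lemma fin_pick (ms ml i c : Int) : fin (ms, ml, i, c) = pick (ms, ml) (i, c) := by
  simp [fin, pick]

lemma runs_pos (gs : List String) (i : Int) : ∀ r ∈ collectRuns gs i, 0 < r.2 := by
  induction gs, i using collectRuns.induct with
  | case1 _ => intro r h; simp [collectRuns_nil] at h
  | case2 t i z ih =>
    intro r hr
    rw [collectRuns_zero] at hr
    rcases List.mem_cons.mp hr with h1 | h2
    · subst h1; simp; omega
    · exact ih r h2
  | case3 g t i h ih =>
    intro r hr
    rw [collectRuns_other g t i h] at hr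
    exact ih r hr

-- folding stepA over a block of zeros, run already open (cs ≠ -1)
lemma zero_block (k : ℕ) : ∀ (i ms ml j cl : Int), j ≠ -1 →
    (PySem.List.enumerate (List.replicate k "0") i).foldl stepA (ms, ml, j, cl)
      = (ms, ml, j, cl + k) := by
  induction k with
  | zero => intro i ms ml j cl _; simp [PySem.List.enumerate_nil]
  | succ k ih =>
    intro i ms ml j cl hj
    rw [List.replicate_succ, PySem.List.enumerate_cons, List.foldl_cons]
    rw [show stepA (ms, ml, j, cl) (i, "0") = (ms, ml, j, cl + 1) from by simp [stepA, hj]]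
    rw [ih (i+1) ms ml j (cl+1) hj]
    simp only [Prod.mk.injEq, true_and]
    push_cast
    ring

-- main invariant: A's loop+final-check equals the pick-fold over the run list
lemma main_inv : ∀ (n : ℕ) (gs : List String) (i ms ml : Int),
    gs.length ≤ n → 0 ≤ i → 0 ≤ ml →
    fin ((PySem.List.enumerate gs i).foldl stepA (ms, ml, -1, 0))
      = (collectRuns gs i).foldl pick (ms, ml) := by
  intro n
  induction n with
  | zero =>
    intro gs i ms ml hlen _ hml
    have : gs = [] := List.eq_nil_of_length_eq_zero (Nat.le_zero.mp hlen)
    subst this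
    simp only [PySem.List.enumerate_nil, List.foldl_nil, collectRuns_nil]
    exact fin_init ms ml hml
  | succ n ih =>
    intro gs i ms ml hlen hi hml
    match gs with
    | [] =>
      simp only [PySem.List.enumerate_nil, List.foldl_nil, collectRuns_nil]
      exact fin_init ms ml hml
    | g :: t =>
      by_cases hg : g = "0"
      · subst hg
        set z := t.takeWhile (· == "0") with hz
        set rest := t.dropWhile (· == "0") with hrest
        have htz : t = z ++ rest := (List.takeWhile_append_dropWhile).symm
        have hzrep : z = List.replicate z.length "0" := by
          apply List.eq_replicate_of_mem
          intro b hb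
          have := List.mem_takeWhile_imp (hz ▸ hb)
          simpa using this
        have hdrop : t.drop z.length = rest := by
          rw [htz]; exact List.drop_left
        rw [collectRuns_zero, ← hz, hdrop]
        rw [PySem.List.enumerate_cons, List.foldl_cons]
        rw [show stepA (ms, ml, -1, 0) (i, "0") = (ms, ml, i, 1) from by simp [stepA]]
        conv_lhs => rw [htz]
        rw [PySem.List.enumerate_append, List.foldl_append]
        have hzb : (PySem.List.enumerate z (i+1)).foldl stepA (ms, ml, i, 1)
            = (ms, ml, i, 1 + (z.length : Int)) := by
          conv_lhs => rw [hzrep]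
          rw [zero_block z.length (i+1) ms ml i 1 (by omega)]
        rw [hzb]
        match hrest' : rest with
        | [] =>
          rw [PySem.List.enumerate_nil, List.foldl_nil, List.foldl_cons, collectRuns_nil,
            List.foldl_nil]
          exact fin_pick ms ml i (1 + (z.length : Int))
        | r :: rt =>
          have hr0 : r ≠ "0" := by
            have h := List.head_dropWhile_not (p := (· == "0")) (l := t)
            rw [← hrest] at h
            simpa using h (by simp)
          rw [PySem.List.enumerate_cons, List.foldl_cons]
          have hstep2 : stepA (ms, ml, i, 1 + (z.length : Int)) (i + 1 + z.length, r)
              = ((pick (ms, ml) (i, 1 + z.length)).1, (pick (ms, ml) (i, 1 + z.length)).2, -1, 0) := by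
            simp only [stepA, pick]
            rw [if_neg (show ¬((i + 1 + (z.length : Int), r).2 = "0") from by simpa using hr0)]
            split <;> rfl
          rw [hstep2]
          have hlen' : rt.length ≤ n := by
            have hll : t.length = z.length + (r :: rt).length := by
              rw [htz]; simp
            simp only [List.length_cons] at hlen
            simp only [List.length_cons] at hll
            omega
          have hpos : 0 ≤ (pick (ms, ml) (i, 1 + (z.length : Int))).2 := by
            simp only [pick]; split <;> simp <;> omega
          rw [ih rt (i + 1 + z.length + 1) _ _ hlen' (by omega) hpos]
          rw [collectRuns_other r rt _ hr0, List.foldl_cons]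
          rw [show i + (1 + (z.length : Int)) + 1 = i + 1 + (z.length : Int) + 1 from by ring]
      · rw [collectRuns_other g t i hg]
        rw [PySem.List.enumerate_cons, List.foldl_cons]
        rw [show stepA (ms, ml, -1, 0) (i, g) = (ms, ml, -1, 0) from by
          simp only [stepA]
          rw [if_neg (by simpa using hg), if_neg (by omega)]]
        exact ih t (i+1) ms ml (by simpa using Nat.le_of_succ_le_succ (by simpa using hlen)) (by omega) hml

-- a zero window forces its elements and its bound
lemma win_elem (gs : List String) (j k m : ℕ)
    (hw : (gs.drop j).take k = List.replicate k "0") (hm : m < k) :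
    gs[j + m]? = some "0" := by
  have h := congrArg (fun l => l[m]?) hw
  simp only [List.getElem?_take, List.getElem?_drop, List.getElem?_replicate, hm, if_pos] at h
  simpa using h

lemma win_bound (gs : List String) (j k : ℕ) (hk : 0 < k)
    (hw : (gs.drop j).take k = List.replicate k "0") : j + k ≤ gs.length := by
  have h := congrArg List.length hw
  simp only [List.length_take, List.length_drop, List.length_replicate] at h
  omega

-- a leading all-zero prefix is captured by takeWhile
lemma take_le_takeWhile : ∀ (t : List String) (m : ℕ),
    t.take m = List.replicate m "0" → m ≤ (t.takeWhile (· == "0")).length := by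
  intro t
  induction t with
  | nil =>
    intro m h
    match m with
    | 0 => omega
    | m + 1 => simp [List.replicate_succ] at h
  | cons a t ih =>
    intro m h
    match m with
    | 0 => omega
    | m + 1 =>
      rw [List.take_succ_cons, List.replicate_succ, List.cons.injEq] at h
      rw [List.takeWhile_cons, if_pos (by simp [h.1])]
      simpa using ih m h.2

-- soundness of the run list: each run is in bounds and is an all-zero window
lemma runs_sound (gs : List String) (i : Int) :
    ∀ r ∈ collectRuns gs i, ∃ p l : ℕ, r.1 = i + p ∧ r.2 = (l : Int) ∧ 0 < l ∧
      p + l ≤ gs.length ∧ (gs.drop p).take l = List.replicate l "0" := by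
  induction gs, i using collectRuns.induct with
  | case1 _ => intro r h; simp [collectRuns_nil] at h
  | case2 t i z ih =>
    intro r hr
    rw [collectRuns_zero] at hr
    have hzlen : (t.takeWhile (· == "0")).length ≤ t.length := (List.takeWhile_prefix _).length_le
    have hzrep : t.takeWhile (· == "0") = List.replicate (t.takeWhile (· == "0")).length "0" := by
      apply List.eq_replicate_of_mem
      intro b hb
      have := List.mem_takeWhile_imp hb
      simpa using this
    have hztake : t.take (t.takeWhile (· == "0")).length = t.takeWhile (· == "0") :=
      (List.prefix_iff_eq_take.mp (List.takeWhile_prefix _)).symm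
    rcases List.mem_cons.mp hr with h1 | h2
    · refine ⟨0, 1 + (t.takeWhile (· == "0")).length, ?_, ?_, by omega, by simp; omega, ?_⟩
      · rw [h1]; simp
      · rw [h1]; push_cast; ring
      · rw [List.drop_zero, show (1 + (t.takeWhile (· == "0")).length) = (t.takeWhile (· == "0")).length + 1 from by omega]
        rw [List.take_succ_cons, hztake, List.replicate_succ]
        exact congrArg (List.cons "0") hzrep
    · obtain ⟨p', l', h1, h2, h3, h4, h5⟩ := ih r h2
      refine ⟨1 + (t.takeWhile (· == "0")).length + p', l', ?_, h2, h3, ?_, ?_⟩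
      · rw [h1]; push_cast; ring
      · have h4' : p' + l' ≤ t.length - (t.takeWhile (· == "0")).length := by
          simpa using h4
        show 1 + (t.takeWhile (· == "0")).length + p' + l' ≤ ("0" :: t).length
        simp only [List.length_cons]
        omega
      · show (("0" :: t).drop (1 + (t.takeWhile (· == "0")).length + p')).take l' = List.replicate l' "0"
        rw [show (1 + (t.takeWhile (· == "0")).length + p') = ((t.takeWhile (· == "0")).length + p') + 1 from by omega]
        rw [List.drop_succ_cons, ← List.drop_drop]
        exact h5
  | case3 g t i h ih =>
    intro r hr
    rw [collectRuns_other g t i h] at hr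
    obtain ⟨p', l', h1, h2, h3, h4, h5⟩ := ih r hr
    refine ⟨p' + 1, l', ?_, h2, h3, by simp; omega, ?_⟩
    · rw [h1]; push_cast; ring
    · rw [List.drop_succ_cons]
      exact h5

-- completeness: every all-zero window lies inside some run
lemma runs_complete (gs : List String) (i : Int) :
    ∀ j k : ℕ, 0 < k → (gs.drop j).take k = List.replicate k "0" →
      ∃ r ∈ collectRuns gs i, ∃ p l : ℕ, r.1 = i + p ∧ r.2 = (l : Int) ∧
        p ≤ j ∧ j + k ≤ p + l := by
  induction gs, i using collectRuns.induct with
  | case1 _ =>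
    intro j k hk hw
    exfalso
    have := win_bound [] j k hk hw
    simp at this
    omega
  | case2 t i z ih =>
    intro j k hk hw
    rw [collectRuns_zero]
    match j with
    | 0 =>
      -- window starts at the head: it is captured by the head run
      have htail : t.take (k - 1) = List.replicate (k - 1) "0" := by
        rw [List.drop_zero] at hw
        match k, hk with
        | k + 1, _ =>
          rw [List.take_succ_cons, List.replicate_succ, List.cons.injEq] at hw
          simpa using hw.2
      have hle := take_le_takeWhile t (k - 1) htail
      exact ⟨_, List.mem_cons_self, 0, 1 + (t.takeWhile (· == "0")).length,
        by simp, by push_cast; ring, by omega, by omega⟩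
    | j + 1 =>
      have hwt : (t.drop j).take k = List.replicate k "0" := by
        simpa [List.drop_succ_cons] using hw
      by_cases hz : j + k ≤ (t.takeWhile (· == "0")).length
      · -- window lies inside the head run
        exact ⟨_, List.mem_cons_self, 0, 1 + (t.takeWhile (· == "0")).length,
          by simp, by push_cast; ring, by omega, by omega⟩
      · -- window starts after the zero prefix: recurse past it
        have hjz : (t.takeWhile (· == "0")).length ≤ j := by
          by_contra hlt
          have hlt' : j < (t.takeWhile (· == "0")).length := Nat.lt_of_not_le hlt
          -- then index (takeWhile).length lies inside the window, yet dropWhile starts there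
          have hb := win_bound t j k hk hwt
          have he := win_elem t j k ((t.takeWhile (· == "0")).length - j) hwt (by omega)
          rw [show j + ((t.takeWhile (· == "0")).length - j) = (t.takeWhile (· == "0")).length from by omega] at he
          have hsplit : t = t.takeWhile (· == "0") ++ t.dropWhile (· == "0") :=
            (List.takeWhile_append_dropWhile).symm
          have hget : t[(t.takeWhile (· == "0")).length]? = (t.dropWhile (· == "0")).head? := by
            have hx := List.getElem?_append_right (l₁ := t.takeWhile (· == "0"))
              (l₂ := t.dropWhile (· == "0")) (i := (t.takeWhile (· == "0")).length) le_rfl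
            rw [← hsplit] at hx
            rw [hx]
            simp [List.head?_eq_getElem?]
          rw [hget] at he
          have hnot := List.head?_dropWhile_not (· == "0") t
          rw [he] at hnot
          simp at hnot
        have hwrec : ((t.drop (t.takeWhile (· == "0")).length).drop (j - (t.takeWhile (· == "0")).length)).take k
            = List.replicate k "0" := by
          rw [List.drop_drop, show (t.takeWhile (· == "0")).length + (j - (t.takeWhile (· == "0")).length) = j from by omega]
          exact hwt
        obtain ⟨r, hr, p', l', h1, h2, h3, h4⟩ := ih (j - (t.takeWhile (· == "0")).length) k hk hwrec
        exact ⟨r, List.mem_cons_of_mem _ hr, 1 + (t.takeWhile (· == "0")).length + p', l',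
          by rw [h1]; push_cast; ring, h2, by omega, by omega⟩
  | case3 g t i h ih =>
    intro j k hk hw
    rw [collectRuns_other g t i h]
    match j with
    | 0 =>
      exfalso
      have he := win_elem (g :: t) 0 k 0 hw hk
      simp at he
      exact h he
    | j + 1 =>
      have hwt : (t.drop j).take k = List.replicate k "0" := by
        simpa [List.drop_succ_cons] using hw
      obtain ⟨r, hr, p', l', h1, h2, h3, h4⟩ := ih j k hk hwt
      exact ⟨r, hr, p' + 1, l', by rw [h1]; push_cast; ring, h2, by omega, by omega⟩

-- run starts strictly increase along the list
lemma runs_pairwise (gs : List String) (i : Int) :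
    (collectRuns gs i).Pairwise (fun r r' => r.1 < r'.1) := by
  induction gs, i using collectRuns.induct with
  | case1 _ => simp [collectRuns_nil]
  | case2 t i z ih =>
    rw [collectRuns_zero]
    refine List.Pairwise.cons ?_ ih
    intro r hr
    obtain ⟨p, l, h1, _, _, _, _⟩ := runs_sound _ _ r hr
    simp only [h1]
    omega
  | case3 g t i h ih =>
    rw [collectRuns_other g t i h]
    exact ih

-- the pick-fold returns the first element of maximal length (or the seed)
lemma pick_spec (rs : List (Int × Int)) :
    ∀ b : Int × Int, rs.Pairwise (fun r r' => r.1 < r'.1) →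
      (rs.foldl pick b = b ∧ ∀ r ∈ rs, r.2 ≤ b.2) ∨
      (rs.foldl pick b ∈ rs ∧ b.2 < (rs.foldl pick b).2 ∧
        (∀ r ∈ rs, r.2 ≤ (rs.foldl pick b).2) ∧
        (∀ r ∈ rs, r.2 = (rs.foldl pick b).2 → (rs.foldl pick b).1 ≤ r.1)) := by
  induction rs with
  | nil => intro b _; left; exact ⟨rfl, by simp⟩
  | cons r rt ih =>
    intro b hpw
    rw [List.foldl_cons]
    have hpw' := (List.pairwise_cons.mp hpw).2
    have hrlt := (List.pairwise_cons.mp hpw).1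
    by_cases hbr : b.2 < r.2
    · have hp : pick b r = r := by simp [pick, hbr]
      rw [hp]
      rcases ih r hpw' with ⟨heq, hle⟩ | ⟨hmem, hlt, hle, hfirst⟩
      · right
        rw [heq]
        refine ⟨List.mem_cons_self, hbr, ?_, ?_⟩
        · intro x hx
          rcases List.mem_cons.mp hx with h1 | h2
          · rw [h1]
          · exact hle x h2
        · intro x hx _
          rcases List.mem_cons.mp hx with h1 | h2
          · rw [h1]
          · exact le_of_lt (hrlt x h2)
      · right
        refine ⟨List.mem_cons_of_mem r hmem, lt_trans hbr hlt, ?_, ?_⟩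
        · intro x hx
          rcases List.mem_cons.mp hx with h1 | h2
          · rw [h1]; exact le_of_lt hlt
          · exact hle x h2
        · intro x hx hx2
          rcases List.mem_cons.mp hx with h1 | h2
          · exfalso; rw [h1] at hx2; omega
          · exact hfirst x h2 hx2
    · have hp : pick b r = b := by simp [pick, hbr]
      rw [hp]
      rcases ih b hpw' with ⟨heq, hle⟩ | ⟨hmem, hlt, hle, hfirst⟩
      · left
        refine ⟨heq, ?_⟩
        intro x hx
        rcases List.mem_cons.mp hx with h1 | h2
        · rw [h1]; omega
        · exact hle x h2
      · right
        refine ⟨List.mem_cons_of_mem r hmem, hlt, ?_, ?_⟩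
        · intro x hx
          rcases List.mem_cons.mp hx with h1 | h2
          · rw [h1]; omega
          · exact hle x h2
        · intro x hx hx2
          rcases List.mem_cons.mp hx with h1 | h2
          · exfalso; rw [h1] at hx2; omega
          · exact hfirst x h2 hx2

-- findSome? over an ascending range: all-none
lemma findSome?_up_none {β : Type} (f : Int → Option β) (a b : Int)
    (h : ∀ x, a ≤ x → x < b → f x = none) :
    (PySem.List.pyRange a b 1).findSome? f = none := by
  rw [List.findSome?_eq_none_iff]
  intro x hx
  exact h x (PySem.List.mem_pyRange_one.mp hx).1 (PySem.List.mem_pyRange_one.mp hx).2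

-- findSome? over an ascending range: first hit
lemma findSome?_up_first {β : Type} (f : Int → Option β) (j b : Int) (v : β)
    (hjb : j < b) (hj : f j = some v) :
    ∀ (m : ℕ) (a : Int), (j - a).toNat = m → a ≤ j →
      (∀ x, a ≤ x → x < j → f x = none) →
      (PySem.List.pyRange a b 1).findSome? f = some v := by
  intro m
  induction m with
  | zero =>
    intro a hm ha _
    have : a = j := by omega
    subst this
    rw [PySem.List.pyRange_one_cons hjb]
    simp [hj]
  | succ m ih =>
    intro a hm ha hnone
    have haj : a < j := by omega
    rw [PySem.List.pyRange_one_cons (by omega)]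
    simp only [List.findSome?_cons, hnone a le_rfl haj]
    exact ih (a + 1) (by omega) (by omega) (fun x hx1 hx2 => hnone x (by omega) hx2)

-- findSome? over a descending range: all-none
lemma findSome?_down_none {β : Type} (f : Int → Option β) (a b : Int)
    (h : ∀ x, b < x → x ≤ a → f x = none) :
    (PySem.List.pyRange a b (-1)).findSome? f = none := by
  rw [List.findSome?_eq_none_iff]
  intro x hx
  exact h x (PySem.List.mem_pyRange_neg_one.mp hx).1 (PySem.List.mem_pyRange_neg_one.mp hx).2

-- findSome? over a descending range: first hit
lemma findSome?_down_first {β : Type} (f : Int → Option β) (j b : Int) (v : β)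
    (hbj : b < j) (hj : f j = some v) :
    ∀ (m : ℕ) (a : Int), (a - j).toNat = m → j ≤ a →
      (∀ x, j < x → x ≤ a → f x = none) →
      (PySem.List.pyRange a b (-1)).findSome? f = some v := by
  intro m
  induction m with
  | zero =>
    intro a hm ha _
    have : a = j := by omega
    subst this
    rw [PySem.List.pyRange_neg_one_cons hbj]
    simp [hj]
  | succ m ih =>
    intro a hm ha hnone
    have hja : j < a := by omega
    rw [PySem.List.pyRange_neg_one_cons (by omega)]
    simp only [List.findSome?_cons, hnone a hja le_rfl]
    exact ih (a - 1) (by omega) (by omega) (fun x hx1 hx2 => hnone x hx1 (by omega))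

lemma str_join_nil : PySem.Str.join ":" [] = "" := rfl

-- B's slice test is exactly the take/drop zero-window condition
lemma cond_iff_win (gs : List String) (y x : Int) (hy : 0 ≤ y) (hx : 0 ≤ x) :
    PySem.List.slice gs (some y) (some (y + x)) = List.replicate x.toNat "0" ↔
      (gs.drop y.toNat).take x.toNat = List.replicate x.toNat "0" := by
  rw [PySem.List.slice_toNat gs hy (by omega)]
  rw [show (y + x).toNat - y.toNat = x.toNat from by omega]

-- the inner loop finds nothing when no zero window of the given length exists
lemma inner_none_of {β : Type} (gs : List String) (x hi : Int) (g : Int → β) (hx : 0 ≤ x)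
    (h : ∀ j : ℕ, (gs.drop j).take x.toNat ≠ List.replicate x.toNat "0") :
    (PySem.List.pyRange 0 hi 1).findSome? (fun i =>
      if PySem.List.slice gs (some i) (some (i + x)) = List.replicate x.toNat "0" then
        some (g i) else none) = none := by
  apply findSome?_up_none
  intro y hy1 _
  rw [if_neg]
  intro hc
  exact h y.toNat ((cond_iff_win gs y x hy1 hx).mp hc)

-- ===== VERDICT (by name: the statement is the Claim_ definition above) =====
theorem compress_address_py_spec : Claim_equal_compress_address_py := by
  intro address _
  unfold Spec_compress_address_py compress_address_py compress_address_py_alt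
  set gs := (PySem.Str.split? address ":").getD [] with hgs
  have H := main_inv gs.length gs 0 (-1) 0 le_rfl le_rfl le_rfl
  rcases hst : (PySem.List.enumerate gs).foldl stepA (-1, 0, -1, 0) with ⟨ms, ml, cs, cl⟩
  rw [hst] at H
  simp only [fin] at H
  dsimp only
  rw [hst]
  have hpair : ((if ml < cl then cs else ms), (if ml < cl then cl else ml))
      = (collectRuns gs 0).foldl pick (-1, 0) := by
    by_cases hc : ml < cl <;> simpa [hc] using H
  have hS := congrArg Prod.fst hpair
  have hT := congrArg Prod.snd hpair
  simp only at hS hT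
  rcases hruns : collectRuns gs 0 with _ | ⟨r0, rt⟩
  · -- no zero runs at all: both sides return the address unchanged
    rw [hruns] at hS hT
    simp only [List.foldl_nil] at hS hT
    have hnw : ∀ j k : ℕ, 0 < k → (gs.drop j).take k ≠ List.replicate k "0" := by
      intro j k hk hw
      obtain ⟨r, hr, -⟩ := runs_complete gs 0 j k hk hw
      rw [hruns] at hr
      simp at hr
    have hB : (PySem.List.pyRange (gs.length : Int) 1 (-1)).findSome? (fun k =>
        (PySem.List.pyRange 0 ((gs.length : Int) - k + 1) 1).findSome? (fun i =>
          if PySem.List.slice gs (some i) (some (i + k)) = List.replicate k.toNat "0" then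
            some (PySem.Str.join ":" (PySem.List.slice gs none (some i)) ++ "::" ++
                  PySem.Str.join ":" (PySem.List.slice gs (some (i + k)) none))
          else none)) = none := by
      apply findSome?_down_none
      intro x hx1 _
      exact inner_none_of gs x _ _ (by omega) (fun j => hnw j x.toNat (by omega))
    rw [hB, hT]
    norm_num
  · -- at least one run: the pick-fold selects the first longest run
    have hpw := runs_pairwise gs 0
    rw [hruns] at hpw
    have hposall := runs_pos gs 0
    rcases pick_spec (r0 :: rt) (-1, 0) hpw with ⟨heq, hle⟩ | ⟨hmem, -, hmax, hfirst⟩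
    · exfalso
      have h1 := hle r0 List.mem_cons_self
      have h2 := hposall r0 (by rw [hruns]; exact List.mem_cons_self)
      simp at h1
      omega
    · rw [hruns] at hS hT
      obtain ⟨P, L, hM1, hM2, hLpos, hbound, hwin⟩ :=
        runs_sound gs 0 _ (by rw [hruns]; exact hmem)
      rw [hM1] at hS
      rw [hM2] at hT
      simp only [zero_add] at hS
      -- no zero window is longer than L
      have hnolong : ∀ (x : Int), (L : Int) < x → ∀ j : ℕ,
          (gs.drop j).take x.toNat ≠ List.replicate x.toNat "0" := by
        intro x hx j hw
        obtain ⟨r, hr, p, l, h1, h2, h3, h4⟩ := runs_complete gs 0 j x.toNat (by omega) hw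
        have hml := hmax r (by rwa [hruns] at hr)
        rw [h2, hM2] at hml
        omega
      by_cases hL2 : 2 ≤ L
      · -- compression applies; B finds the window (P, L) first
        have hcondP : PySem.List.slice gs (some (P : Int)) (some ((P : Int) + (L : Int)))
            = List.replicate ((L : Int)).toNat "0" := by
          rw [cond_iff_win gs _ _ (by omega) (by omega)]
          simpa using hwin
        have hinner : (PySem.List.pyRange 0 ((gs.length : Int) - (L : Int) + 1) 1).findSome?
            (fun i =>
              if PySem.List.slice gs (some i) (some (i + (L : Int)))
                  = List.replicate ((L : Int)).toNat "0" then
                some (PySem.Str.join ":" (PySem.List.slice gs none (some i)) ++ "::" ++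
                      PySem.Str.join ":" (PySem.List.slice gs (some (i + (L : Int))) none))
              else none)
            = some (PySem.Str.join ":" (PySem.List.slice gs none (some (P : Int))) ++ "::" ++
                    PySem.Str.join ":" (PySem.List.slice gs (some ((P : Int) + (L : Int))) none)) := by
        -- first hit at i = P
          apply findSome?_up_first _ (P : Int) _ _ (by omega) (by rw [if_pos hcondP]) P 0
            (by omega) (by omega)
          intro x hx1 hx2
          rw [if_neg]
          intro hc
          have hwx := (cond_iff_win gs x _ hx1 (by omega)).mp hc
          simp only [Int.toNat_natCast] at hwx
          obtain ⟨r, hr, p, l, h1, h2, h3, h4⟩ := runs_complete gs 0 x.toNat L (by omega) hwx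
          have hml := hmax r (by rwa [hruns] at hr)
          rw [h2, hM2] at hml
          have hlL : l = L := by omega
          have hpx : p = x.toNat := by omega
          have hfr := hfirst r (by rwa [hruns] at hr) (by rw [h2, hM2, hlL])
          rw [h1, hM1] at hfr
          omega
        have hB : (PySem.List.pyRange (gs.length : Int) 1 (-1)).findSome? (fun k =>
            (PySem.List.pyRange 0 ((gs.length : Int) - k + 1) 1).findSome? (fun i =>
              if PySem.List.slice gs (some i) (some (i + k)) = List.replicate k.toNat "0" then
                some (PySem.Str.join ":" (PySem.List.slice gs none (some i)) ++ "::" ++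
                      PySem.Str.join ":" (PySem.List.slice gs (some (i + k)) none))
              else none))
            = some (PySem.Str.join ":" (PySem.List.slice gs none (some (P : Int))) ++ "::" ++
                    PySem.Str.join ":" (PySem.List.slice gs (some ((P : Int) + (L : Int))) none)) := by
          apply findSome?_down_first _ (L : Int) _ _ (by omega) hinner
            ((gs.length : Int) - L).toNat (gs.length : Int) rfl (by omega)
          intro x hx1 _
          exact inner_none_of gs x _ _ (by omega) (hnolong x hx1)
        rw [hB, hS, hT]
        rw [if_pos (show (2:Int) ≤ (L : Int) from by omega)]
        rw [show ((P : Int) + (L : Int)) = (((P + L : ℕ) : Int)) from by push_cast; ring]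
        rw [PySem.List.slice_to_natCast, PySem.List.slice_from_natCast]
        split_ifs with ha hb hd
        · rcases ha with ⟨h1, h2⟩
          simp [h1, h2, str_join_nil]
        · simp [hb, str_join_nil]
        · simp [hd, str_join_nil]
        · rfl
      · -- longest run is a single zero: no compression on either side
        have hB : (PySem.List.pyRange (gs.length : Int) 1 (-1)).findSome? (fun k =>
            (PySem.List.pyRange 0 ((gs.length : Int) - k + 1) 1).findSome? (fun i =>
              if PySem.List.slice gs (some i) (some (i + k)) = List.replicate k.toNat "0" then
                some (PySem.Str.join ":" (PySem.List.slice gs none (some i)) ++ "::" ++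
                      PySem.Str.join ":" (PySem.List.slice gs (some (i + k)) none))
              else none)) = none := by
          apply findSome?_down_none
          intro x hx1 _
          exact inner_none_of gs x _ _ (by omega) (hnolong x (by omega))
        rw [hB, hT]
        rw [if_neg (by omega)]
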